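-- pv_equiv track=rewrite | github.com/bitnose/Python | Matrices/sudoku_check_block.py | block_ok
-- ===== SOURCE A (Python) =====
-- def block_ok(matrix, row_index: int, column_index: int):
--
--     if row_index not in (0, 3, 6) or column_index not in (0, 3, 6):
--         return False
--
--     for numb in range(1, 10):
--         count = 0
--         for row in matrix[row_index:row_index+3]:
--             for col in row[column_index:column_index+3]:
--                 if col == numb:
--                     if count < 1:
--                         count +=1
--                     else:
--                         return False
--     return True
-- ===== SOURCE B (Python) =====
-- def block_ok(matrix, row_index: int, column_index: int):
--     if row_index not in (0, 3, 6) or column_index not in (0, 3, 6):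
--         return False
--     seen = set()
--     for row in matrix[row_index:row_index+3]:
--         for v in row[column_index:column_index+3]:
--             if 1 <= v <= 9:
--                 if v in seen:
--                     return False
--                 seen.add(v)
--     return True
-- ===== Notes on version B (the rewrite author's own statement) =====
-- stated objective: simpler
-- what changed: One pass over the nine block cells with a maintained 'seen' set of digits 1-9, instead of rescanning the block once per digit 1..9 with a per-digit counter.
import Mathlib
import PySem

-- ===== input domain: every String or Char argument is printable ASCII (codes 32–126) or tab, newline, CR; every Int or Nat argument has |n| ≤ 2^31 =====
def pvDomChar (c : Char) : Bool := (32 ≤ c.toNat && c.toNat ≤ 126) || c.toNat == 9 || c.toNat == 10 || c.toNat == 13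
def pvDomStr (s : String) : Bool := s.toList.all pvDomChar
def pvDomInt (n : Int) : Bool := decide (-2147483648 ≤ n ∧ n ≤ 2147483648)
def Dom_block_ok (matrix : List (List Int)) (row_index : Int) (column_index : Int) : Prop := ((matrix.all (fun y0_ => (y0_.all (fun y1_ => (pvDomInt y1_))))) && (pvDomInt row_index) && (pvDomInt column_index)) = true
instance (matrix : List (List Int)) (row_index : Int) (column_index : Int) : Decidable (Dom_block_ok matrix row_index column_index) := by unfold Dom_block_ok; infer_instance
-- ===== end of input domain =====

-- B replaces A's nine per-digit rescans of the block by a single pass over the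
-- block cells maintaining a set of digits already seen (objective: simpler).

-- ===== PORT A =====
-- inner 'for col in row[column_index:column_index+3]' for one digit numb, threading count; none = 'return False'
def aScanRow (numb : Int) : List Int → Int → Option Int
  | [], count => some count
  | col :: cols, count =>
    if col = numb then
      if count < 1 then aScanRow numb cols (count + 1) else none
    else aScanRow numb cols count

-- 'for row in matrix[row_index:row_index+3]' for one digit numb
def aScanRows (numb cI : Int) : List (List Int) → Int → Option Int
  | [], count => some count
  | r :: rs, count =>
    match aScanRow numb (PySem.List.slice r (some cI) (some (cI + 3))) count with
    | none => none
    | some count' => aScanRows numb cI rs count'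

-- 'for numb in range(1, 10)'
def aLoop (rows : List (List Int)) (cI : Int) : List Int → Bool
  | [] => true
  | numb :: numbs =>
    match aScanRows numb cI rows 0 with
    | none => false
    | some _ => aLoop rows cI numbs

def block_ok (matrix : List (List Int)) (row_index : Int) (column_index : Int) : Bool :=
  if ¬ ((row_index = 0 ∨ row_index = 3 ∨ row_index = 6) ∧
        (column_index = 0 ∨ column_index = 3 ∨ column_index = 6)) then false
  else
    aLoop (PySem.List.slice matrix (some row_index) (some (row_index + 3))) column_index
      (PySem.List.pyRange 1 10 1)

-- ===== PORT B =====
-- inner 'for v in row[column_index:column_index+3]', threading the seen set; none = 'return False'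
def bScanRow : List Int → PySem.Set Int → Option (PySem.Set Int)
  | [], seen => some seen
  | v :: vs, seen =>
    if 1 ≤ v ∧ v ≤ 9 then
      if v ∈ seen then none else bScanRow vs (PySem.Set.add seen v)
    else bScanRow vs seen

-- 'for row in matrix[row_index:row_index+3]'
def bScanRows (cI : Int) : List (List Int) → PySem.Set Int → Bool
  | [], _ => true
  | r :: rs, seen =>
    match bScanRow (PySem.List.slice r (some cI) (some (cI + 3))) seen with
    | none => false
    | some seen' => bScanRows cI rs seen'

def block_ok_alt (matrix : List (List Int)) (row_index : Int) (column_index : Int) : Bool :=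
  if ¬ ((row_index = 0 ∨ row_index = 3 ∨ row_index = 6) ∧
        (column_index = 0 ∨ column_index = 3 ∨ column_index = 6)) then false
  else
    bScanRows column_index (PySem.List.slice matrix (some row_index) (some (row_index + 3)))
      PySem.Set.empty

-- ===== PRECONDITION & SPEC =====
def Spec_block_ok (matrix : List (List Int)) (row_index : Int) (column_index : Int) (out : Bool) : Prop := out = block_ok_alt matrix row_index column_index
instance (matrix : List (List Int)) (row_index : Int) (column_index : Int) (out : Bool) : Decidable (Spec_block_ok matrix row_index column_index out) := by unfold Spec_block_ok; infer_instance

-- ===== CLAIM (what is proved, stated in full; the proofs are below) =====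
def Claim_equal_block_ok : Prop := ∀ (matrix : List (List Int)) (row_index : Int) (column_index : Int), Dom_block_ok matrix row_index column_index → Spec_block_ok matrix row_index column_index (block_ok matrix row_index column_index)

-- ===== LEMMAS AND PROOFS =====

-- the cells of the block, row by row
def blockCells (cI : Int) (rows : List (List Int)) : List Int :=
  (rows.map (fun r => PySem.List.slice r (some cI) (some (cI + 3)))).flatten

theorem aScanRow_eq (numb : Int) (cols : List Int) (count : Int) (hcount : count ≤ 1) :
    aScanRow numb cols count =
      if 2 ≤ count + (cols.count numb : Int) then none
      else some (count + (cols.count numb : Int)) := by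
  induction cols generalizing count with
  | nil =>
    simp only [aScanRow, List.count_nil, Nat.cast_zero, add_zero]
    rw [if_neg (by omega)]
  | cons c cs ih =>
    by_cases h : c = numb
    · subst h
      have hcnt : ((c :: cs).count c : Int) = (cs.count c : Int) + 1 := by
        simp
      by_cases hc : count < 1
      · simp only [aScanRow, if_true, if_pos hc]
        rw [ih _ (by omega), hcnt]
        have harith : count + ((cs.count c : Int) + 1) = count + 1 + (cs.count c : Int) := by ring
        rw [harith]
      · simp only [aScanRow, if_true, if_neg hc]
        have hge : 2 ≤ count + ((cs.count c : Int) + 1) := by omega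
        rw [hcnt, if_pos hge]
    · simp only [aScanRow, if_neg h]
      rw [ih _ hcount, List.count_cons_of_ne h]

theorem aScanRows_eq (numb cI : Int) (rows : List (List Int)) (count : Int) (hcount : count ≤ 1) :
    aScanRows numb cI rows count =
      if 2 ≤ count + ((blockCells cI rows).count numb : Int) then none
      else some (count + ((blockCells cI rows).count numb : Int)) := by
  induction rows generalizing count with
  | nil =>
    simp only [aScanRows, blockCells, List.map_nil, List.flatten_nil, List.count_nil,
      Nat.cast_zero, add_zero]
    rw [if_neg (by omega)]
  | cons r rs ih =>
    have hcells : ((blockCells cI (r :: rs)).count numb : Int) =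
        ((PySem.List.slice r (some cI) (some (cI + 3))).count numb : Int) +
          ((blockCells cI rs).count numb : Int) := by
      simp [blockCells, List.count_append]
    simp only [aScanRows]
    cases hsr : aScanRow numb (PySem.List.slice r (some cI) (some (cI + 3))) count with
    | none =>
      dsimp only
      rw [aScanRow_eq numb _ count hcount] at hsr
      by_cases h : 2 ≤ count + ((PySem.List.slice r (some cI) (some (cI + 3))).count numb : Int)
      · have hge : 2 ≤ count + ((blockCells cI (r :: rs)).count numb : Int) := by
          rw [hcells]; omega
        rw [if_pos hge]
      · rw [if_neg h] at hsr
        simp at hsr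
    | some count' =>
      dsimp only
      rw [aScanRow_eq numb _ count hcount] at hsr
      by_cases h : 2 ≤ count + ((PySem.List.slice r (some cI) (some (cI + 3))).count numb : Int)
      · rw [if_pos h] at hsr
        simp at hsr
      · rw [if_neg h] at hsr
        injection hsr with hsr'
        subst hsr'
        have hle : count + ((PySem.List.slice r (some cI) (some (cI + 3))).count numb : Int) ≤ 1 := by omega
        rw [ih _ hle, hcells, ← add_assoc]

theorem aLoop_eq_true_iff (rows : List (List Int)) (cI : Int) (ns : List Int) :
    aLoop rows cI ns = true ↔ ∀ n ∈ ns, (blockCells cI rows).count n ≤ 1 := by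
  induction ns with
  | nil => simp [aLoop]
  | cons n ns ih =>
    simp only [aLoop]
    cases hs : aScanRows n cI rows 0 with
    | none =>
      dsimp only
      rw [aScanRows_eq n cI rows 0 (by norm_num)] at hs
      simp only [Bool.false_eq_true, false_iff]
      intro hall
      by_cases h : 2 ≤ (0 : Int) + ((blockCells cI rows).count n : Int)
      · have := hall n (by simp)
        omega
      · rw [if_neg h] at hs
        simp at hs
    | some c =>
      dsimp only
      rw [aScanRows_eq n cI rows 0 (by norm_num)] at hs
      by_cases h : 2 ≤ (0 : Int) + ((blockCells cI rows).count n : Int)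
      · rw [if_pos h] at hs
        simp at hs
      · rw [ih]
        constructor
        · intro hall u hu
          rcases List.mem_cons.mp hu with rfl | hu
          · omega
          · exact hall u hu
        · intro hall u hu
          exact hall u (List.mem_cons_of_mem _ hu)

-- the invariant for B's pass: no tracked digit in 'seen' recurs, no tracked digit duplicated
def Good (cells : List Int) (seen : PySem.Set Int) : Prop :=
  ∀ v : Int, 1 ≤ v → v ≤ 9 → (v ∈ seen → v ∉ cells) ∧ cells.count v ≤ 1

theorem good_step (v : Int) (vs : List Int) (seen : PySem.Set Int)
    (hr : 1 ≤ v ∧ v ≤ 9) (hs : v ∉ seen) :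
    Good vs (PySem.Set.add seen v) ↔ Good (v :: vs) seen := by
  constructor
  · intro hg u h1 h2
    have hu := hg u h1 h2
    by_cases huv : u = v
    · subst huv
      have hmem : u ∈ PySem.Set.add seen u := (PySem.Set.mem_add _ _ _).mpr (Or.inr rfl)
      have hnot : u ∉ vs := hu.1 hmem
      refine ⟨fun hus => absurd hus hs, ?_⟩
      have h0 : vs.count u = 0 := List.count_eq_zero.mpr hnot
      rw [List.count_cons_self, h0]
    · refine ⟨fun hus => ?_, ?_⟩
      · have hnot : u ∉ vs := hu.1 ((PySem.Set.mem_add _ _ _).mpr (Or.inl hus))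
        intro hmem
        rcases List.mem_cons.mp hmem with h | h
        · exact huv h
        · exact hnot h
      · rw [List.count_cons_of_ne (Ne.symm huv)]
        exact hu.2
  · intro hg u h1 h2
    have hu := hg u h1 h2
    by_cases huv : u = v
    · subst huv
      have hcnt := hu.2
      rw [List.count_cons_self] at hcnt
      have h0 : vs.count u = 0 := by omega
      have hnot : u ∉ vs := List.count_eq_zero.mp h0
      exact ⟨fun _ => hnot, by omega⟩
    · refine ⟨fun hus => ?_, ?_⟩
      · rcases (PySem.Set.mem_add seen v u).mp hus with h | h
        · intro hvs
          exact hu.1 h (List.mem_cons_of_mem _ hvs)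
        · exact absurd h huv
      · have := hu.2
        rwa [List.count_cons_of_ne (Ne.symm huv)] at this

theorem good_skip (v : Int) (vs : List Int) (seen : PySem.Set Int)
    (hr : ¬ (1 ≤ v ∧ v ≤ 9)) :
    Good vs seen ↔ Good (v :: vs) seen := by
  constructor <;> intro hg u h1 h2 <;> have hu := hg u h1 h2 <;>
    have huv : u ≠ v := by rintro rfl; exact hr ⟨h1, h2⟩
  · refine ⟨fun hus => ?_, ?_⟩
    · intro hmem
      rcases List.mem_cons.mp hmem with h | h
      · exact huv h
      · exact hu.1 hus h
    · rw [List.count_cons_of_ne (Ne.symm huv)]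
      exact hu.2
  · refine ⟨fun hus => ?_, ?_⟩
    · intro hvs
      exact hu.1 hus (List.mem_cons_of_mem _ hvs)
    · have := hu.2
      rwa [List.count_cons_of_ne (Ne.symm huv)] at this

theorem bScanRow_isSome_iff (cells : List Int) (seen : PySem.Set Int) :
    (bScanRow cells seen).isSome = true ↔ Good cells seen := by
  induction cells generalizing seen with
  | nil =>
    simp only [bScanRow, Option.isSome_some, true_iff]
    intro v _ _
    exact ⟨fun _ => List.not_mem_nil, by simp⟩
  | cons v vs ih =>
    simp only [bScanRow]
    by_cases hr : 1 ≤ v ∧ v ≤ 9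
    · rw [if_pos hr]
      by_cases hs : v ∈ seen
      · rw [if_pos hs]
        simp only [Option.isSome_none, Bool.false_eq_true, false_iff]
        intro hg
        exact (hg v hr.1 hr.2).1 hs (List.mem_cons_self)
      · rw [if_neg hs, ih]
        exact good_step v vs seen hr hs
    · rw [if_neg hr, ih]
      exact good_skip v vs seen hr

theorem bScanRow_append (xs ys : List Int) (seen : PySem.Set Int) :
    bScanRow (xs ++ ys) seen = (bScanRow xs seen).bind (bScanRow ys) := by
  induction xs generalizing seen with
  | nil => simp [bScanRow]
  | cons v vs ih =>
    by_cases hr : 1 ≤ v ∧ v ≤ 9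
    · by_cases hs : v ∈ seen
      · simp [bScanRow, hr, hs]
      · simp [bScanRow, hr, hs, ih]
    · simp [bScanRow, hr, ih]

theorem bScanRows_eq (cI : Int) (rows : List (List Int)) (seen : PySem.Set Int) :
    bScanRows cI rows seen = (bScanRow (blockCells cI rows) seen).isSome := by
  induction rows generalizing seen with
  | nil => simp [bScanRows, blockCells, bScanRow]
  | cons r rs ih =>
    simp only [bScanRows]
    have hc : blockCells cI (r :: rs) =
        PySem.List.slice r (some cI) (some (cI + 3)) ++ blockCells cI rs := by
      simp [blockCells]
    rw [hc, bScanRow_append]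
    cases h : bScanRow (PySem.List.slice r (some cI) (some (cI + 3))) seen with
    | none => simp
    | some seen' => simp [ih]

-- ===== VERDICT (by name: the statement is the Claim_ definition above) =====
theorem block_ok_spec : Claim_equal_block_ok := by
  intro matrix rI cI _
  unfold Spec_block_ok block_ok block_ok_alt
  by_cases hg : (rI = 0 ∨ rI = 3 ∨ rI = 6) ∧ (cI = 0 ∨ cI = 3 ∨ cI = 6)
  · rw [if_neg (not_not_intro hg), if_neg (not_not_intro hg)]
    set rows := PySem.List.slice matrix (some rI) (some (rI + 3)) with hrows
    rw [bScanRows_eq]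
    by_cases hP : ∀ n : Int, 1 ≤ n → n ≤ 9 → (blockCells cI rows).count n ≤ 1
    · have h1 : aLoop rows cI (PySem.List.pyRange 1 10 1) = true := by
        rw [aLoop_eq_true_iff]
        intro n hn
        rw [PySem.List.mem_pyRange_one] at hn
        exact hP n hn.1 (by omega)
      have h2 : (bScanRow (blockCells cI rows) PySem.Set.empty).isSome = true := by
        rw [bScanRow_isSome_iff]
        intro v h1 h2
        refine ⟨fun hv => absurd hv (by simp [PySem.Set.empty]), hP v h1 h2⟩
      rw [h1, h2]
    · have h1 : aLoop rows cI (PySem.List.pyRange 1 10 1) ≠ true := by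
        intro hb
        apply hP
        intro n hn1 hn2
        exact (aLoop_eq_true_iff rows cI (PySem.List.pyRange 1 10 1)).mp hb n
          (PySem.List.mem_pyRange_one.mpr ⟨hn1, by omega⟩)
      have h2 : (bScanRow (blockCells cI rows) PySem.Set.empty).isSome ≠ true := by
        intro hb
        apply hP
        intro n hn1 hn2
        exact ((bScanRow_isSome_iff (blockCells cI rows) PySem.Set.empty).mp hb n hn1 hn2).2
      simp only [Bool.not_eq_true] at h1 h2
      rw [h1, h2]
  · rw [if_pos hg, if_pos hg]
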